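-- pv_equiv track=rewrite | github.com/erlestor/advent-of-code-2023 | 14/b.py | slideRocks
-- ===== SOURCE A (Python) =====
-- def flipPlatform(platform):
--     flippedPlatform = []
--     for i in range(len(platform[0])):
--         column = "".join([line[i] for line in platform])
--         flippedPlatform.append(column)
--     return flippedPlatform
--
-- def slideRocks(platform, direction):
--     if direction == "north" or direction == "south":
--         platform = flipPlatform(platform)
--
--     newRows = []
--
--     for row in platform:
--         newRow = ""
--         sections = row.split("#")
--
--         for i, section in enumerate(sections):
--             prefix = "#" if i > 0 else ""
--
--             if len(section) == 0:
--                 newRow += prefix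
--                 continue
--
--             numberOfRocks = section.count("O")
--             numberOfEmptySpaces = len(section) - numberOfRocks
--             if direction == "north" or direction == "west":
--                 newRow += prefix + "O" * numberOfRocks + "." * numberOfEmptySpaces
--             else:
--                 newRow += prefix + "." * numberOfEmptySpaces + "O" * numberOfRocks
--
--
--         newRows.append(newRow)
--
--     if direction == "north" or direction == "south":
--         flippedPlatform = flipPlatform(newRows)
--     else:
--         flippedPlatform = newRows
--     return flippedPlatform
-- ===== SOURCE B (Python) =====
-- def _transpose(platform):
--     return ["".join(line[i] for line in platform) for i in range(len(platform[0]))]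
--
-- def _roll(row, fwd):
--     out = []
--     rocks = 0
--     gaps = 0
--     for c in row:
--         if c == '#':
--             out.append("O" * rocks + "." * gaps if fwd else "." * gaps + "O" * rocks)
--             out.append("#")
--             rocks = 0
--             gaps = 0
--         elif c == 'O':
--             rocks += 1
--         else:
--             gaps += 1
--     out.append("O" * rocks + "." * gaps if fwd else "." * gaps + "O" * rocks)
--     return "".join(out)
--
-- def slideRocks(platform, direction):
--     vertical = direction == "north" or direction == "south"
--     rows = _transpose(platform) if vertical else platform
--     fwd = direction == "north" or direction == "west"
--     rolled = [_roll(row, fwd) for row in rows]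
--     return _transpose(rolled) if vertical else rolled
-- ===== Notes on version B (the rewrite author's own statement) =====
-- stated objective: alternative
-- what changed: Replaces A's per-row split('#') / enumerate / count('O') repacking with a single streaming pass per row that keeps rock and gap counters and flushes a packed block at each wall and at the end; the transpose for north/south is kept.
import Mathlib
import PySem

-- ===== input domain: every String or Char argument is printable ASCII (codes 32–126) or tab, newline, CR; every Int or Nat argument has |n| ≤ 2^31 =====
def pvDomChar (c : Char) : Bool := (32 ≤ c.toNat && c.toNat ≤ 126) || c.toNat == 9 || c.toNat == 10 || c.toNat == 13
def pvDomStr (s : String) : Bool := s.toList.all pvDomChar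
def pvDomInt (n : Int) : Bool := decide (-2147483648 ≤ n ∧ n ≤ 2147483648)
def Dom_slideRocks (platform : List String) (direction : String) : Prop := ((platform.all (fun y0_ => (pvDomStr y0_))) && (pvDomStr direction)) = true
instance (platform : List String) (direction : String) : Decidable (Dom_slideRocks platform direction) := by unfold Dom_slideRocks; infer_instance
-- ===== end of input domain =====

-- B replaces A's per-row split('#')/count('O') repacking by a single streaming pass with
-- rock/gap counters flushed at each wall (objective: alternative decomposition, one pass per row).

-- ===== PORT A =====
-- flipPlatform: platform[0] and line[i] raise IndexError on empty/too-short rows;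
-- those inputs are excluded by Pre_slideRocks, so the .getD defaults are never reached there.
def flipA (p : List (List Char)) : List (List Char) :=
  (PySem.List.pyRange 0 ((PySem.List.pyGet? p 0).getD []).length 1).foldl
    (fun acc i => acc ++ [p.map (fun line => (PySem.List.pyGet? line i).getD ' ')]) []

-- loop body of A: one step of 'for i, section in enumerate(row.split("#")): …'
def stepA (fwd : Bool) (newRow : List Char) (p : Int × List Char) : List Char :=
  let pre : List Char := if p.1 > 0 then ['#'] else []
  if p.2.length = 0 then newRow ++ pre
  else
    let numberOfRocks := PySem.Chars.count p.2 ['O']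
    let numberOfEmptySpaces := p.2.length - numberOfRocks
    if fwd then newRow ++ pre ++ List.replicate numberOfRocks 'O' ++ List.replicate numberOfEmptySpaces '.'
    else newRow ++ pre ++ List.replicate numberOfEmptySpaces '.' ++ List.replicate numberOfRocks 'O'

def rowA (fwd : Bool) (row : List Char) : List Char :=
  let sections := PySem.Chars.splitOn row ['#']
  (PySem.List.enumerate sections 0).foldl (stepA fwd) []

def slideRocks (platform : List String) (direction : String) : List String :=
  let p := platform.map (·.toList)
  let p1 := if direction == "north" || direction == "south" then flipA p else p
  let fwd := direction == "north" || direction == "west"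
  let newRows := p1.foldl (fun acc row => acc ++ [rowA fwd row]) []
  let res := if direction == "north" || direction == "south" then flipA newRows else newRows
  res.map (fun l => String.ofList l)

-- ===== PORT B =====
def flipB (p : List (List Char)) : List (List Char) :=
  (PySem.List.pyRange 0 ((PySem.List.pyGet? p 0).getD []).length 1).map
    (fun i => p.map (fun line => (PySem.List.pyGet? line i).getD ' '))

-- one streaming pass: counters (rocks, gaps) flushed at each '#' and at the end
def rollB (fwd : Bool) (row : List Char) : List Char :=
  let st := row.foldl (fun (st : List (List Char) × Nat × Nat) c =>
    if c = '#' then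
      (st.1 ++ [if fwd then List.replicate st.2.1 'O' ++ List.replicate st.2.2 '.'
                else List.replicate st.2.2 '.' ++ List.replicate st.2.1 'O'] ++ [['#']], 0, 0)
    else if c = 'O' then (st.1, st.2.1 + 1, st.2.2)
    else (st.1, st.2.1, st.2.2 + 1)) ([], 0, 0)
  (st.1 ++ [if fwd then List.replicate st.2.1 'O' ++ List.replicate st.2.2 '.'
            else List.replicate st.2.2 '.' ++ List.replicate st.2.1 'O']).flatten

def slideRocks_alt (platform : List String) (direction : String) : List String :=
  let p := platform.map (·.toList)
  let vertical := direction == "north" || direction == "south"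
  let rows := if vertical then flipB p else p
  let fwd := direction == "north" || direction == "west"
  let rolled := rows.map (rollB fwd)
  (if vertical then flipB rolled else rolled).map (fun l => String.ofList l)

-- ===== PRECONDITION & SPEC =====
-- Pre_ excludes exactly the inputs where A raises IndexError: for north/south the platform
-- must be nonempty, its first row nonempty, and no row shorter than the first row.
def Pre_slideRocks (platform : List String) (direction : String) : Prop :=
  (direction = "north" ∨ direction = "south") →
    platform ≠ [] ∧ 0 < (platform.headD "").toList.length ∧
      ∀ s ∈ platform, (platform.headD "").toList.length ≤ s.toList.length
instance (platform : List String) (direction : String) : Decidable (Pre_slideRocks platform direction) := by unfold Pre_slideRocks; infer_instance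

def pvWitness_slideRocks : List String × String := (["O.#O", ".O..", "#..O"], "north")

def Spec_slideRocks (platform : List String) (direction : String) (out : List String) : Prop := out = slideRocks_alt platform direction
instance (platform : List String) (direction : String) (out : List String) : Decidable (Spec_slideRocks platform direction out) := by unfold Spec_slideRocks; infer_instance

-- ===== CLAIM (what is proved, stated in full; the proofs are below) =====
def Claim_equal_slideRocks : Prop := ∀ (platform : List String) (direction : String), Dom_slideRocks platform direction → Pre_slideRocks platform direction → Spec_slideRocks platform direction (slideRocks platform direction)

-- ===== LEMMAS AND PROOFS =====

-- the packed block a (rocks, gaps) counter pair flushes to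
def pk (fwd : Bool) (r g : Nat) : List Char :=
  if fwd then List.replicate r 'O' ++ List.replicate g '.'
  else List.replicate g '.' ++ List.replicate r 'O'

-- common recursive description of the per-row transform
def go (fwd : Bool) : List Char → Nat → Nat → List Char
  | [], r, g => pk fwd r g
  | c :: t, r, g =>
      if c = '#' then pk fwd r g ++ '#' :: go fwd t 0 0
      else if c = 'O' then go fwd t (r + 1) g
      else go fwd t r (g + 1)

def body (fwd : Bool) (sec : List Char) : List Char := pk fwd (sec.count 'O') (sec.length - sec.count 'O')

theorem pk_zero_zero (fwd : Bool) : pk fwd 0 0 = [] := by cases fwd <;> simp [pk]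


theorem countO_go (fuel : Nat) (l : List Char) (acc : Nat) (h : l.length ≤ fuel) :
    PySem.Chars.count.go ['O'] fuel l acc = acc + l.count 'O' := by
  induction fuel generalizing l acc with
  | zero =>
    have : l = [] := List.eq_nil_of_length_eq_zero (Nat.le_zero.mp h)
    subst this; simp [PySem.Chars.count.go]
  | succ n ih =>
    cases l with
    | nil => simp [PySem.Chars.count.go]
    | cons c t =>
      simp only [PySem.Chars.count.go, List.isPrefixOf]
      by_cases hc : c = 'O'
      · subst hc
        simp only [beq_self_eq_true, Bool.and_true, if_true]
        rw [ih _ _ (by simpa using Nat.le_of_succ_le_succ h)]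
        simp
        omega
      · rw [if_neg (by simp [Ne.symm hc]), ih t acc (by simpa using Nat.le_of_succ_le_succ h)]
        simp [hc]

theorem splitOn_go (fuel : Nat) (l cur : List Char) (acc : List (List Char))
    (h : l.length ≤ fuel) :
    PySem.Chars.splitOn.go ['#'] fuel l cur acc =
      acc.reverse ++ (List.splitOnP (· == '#') l).modifyHead (cur.reverse ++ ·) := by
  induction fuel generalizing l cur acc with
  | zero =>
    have : l = [] := List.eq_nil_of_length_eq_zero (Nat.le_zero.mp h)
    subst this; simp [PySem.Chars.splitOn.go, List.splitOnP_nil]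
  | succ n ih =>
    cases l with
    | nil => simp [PySem.Chars.splitOn.go, List.splitOnP_nil]
    | cons c t =>
      simp only [PySem.Chars.splitOn.go, List.isPrefixOf]
      by_cases hc : c = '#'
      · subst hc
        simp only [beq_self_eq_true, Bool.and_true, if_true]
        rw [ih _ _ _ (by simpa using Nat.le_of_succ_le_succ h)]
        rcases hS : List.splitOnP (· == '#') t with _ | ⟨s0, S⟩
        · exact absurd hS (List.splitOnP_ne_nil _ t)
        · simp [List.splitOnP_cons, hS]
      · rw [if_neg (by simp [Ne.symm hc]),
            ih t (c :: cur) acc (by simpa using Nat.le_of_succ_le_succ h)]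
        rcases hS : List.splitOnP (· == '#') t with _ | ⟨s0, S⟩
        · exact absurd hS (List.splitOnP_ne_nil _ t)
        · simp [List.splitOnP_cons, hc, hS]

theorem countO (l : List Char) : PySem.Chars.count l ['O'] = l.count 'O' := by
  simp [PySem.Chars.count, countO_go l.length l 0 (le_refl _)]

theorem splitOn_eq (l : List Char) :
    PySem.Chars.splitOn l ['#'] = List.splitOnP (· == '#') l := by
  have := splitOn_go (l.length + 1) l [] [] (by omega)
  rcases hS : List.splitOnP (· == '#') l with _ | ⟨s0, S⟩
  · exact absurd hS (List.splitOnP_ne_nil _ l)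
  · simpa [PySem.Chars.splitOn, hS] using this

-- go in terms of splitOnP: head section absorbed into the running counters
theorem go_spec (fwd : Bool) (row : List Char) (r g : Nat) :
    go fwd row r g =
      match List.splitOnP (· == '#') row with
      | [] => []
      | s0 :: S =>
          pk fwd (r + s0.count 'O') (g + (s0.length - s0.count 'O')) ++
            (S.map (fun sec => '#' :: body fwd sec)).flatten := by
  induction row generalizing r g with
  | nil => simp [go, List.splitOnP_nil]
  | cons c t ih =>
    rcases hS : List.splitOnP (· == '#') t with _ | ⟨s0, S⟩
    · exact absurd hS (List.splitOnP_ne_nil _ t)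
    have hle : s0.count 'O' ≤ s0.length := List.count_le_length
    by_cases hc : c = '#'
    · subst hc
      simp only [go, if_pos rfl, List.splitOnP_cons, ih 0 0, hS]
      simp [body]
    · by_cases hO : c = 'O'
      · subst hO
        simp only [go, if_neg (by decide : ¬ ('O' = '#')), if_pos rfl, ih (r + 1) g,
          List.splitOnP_cons, hS]
        simp only [beq_iff_eq, if_neg (by decide : ¬ ('O' = '#')), List.modifyHead_cons,
          List.count_cons, List.length_cons, hS]
        have hg : (if ('O':Char) = 'O' then 1 else 0) = 1 := by decide
        rw [if_pos trivial]
        congr 2 <;> simp [hg] <;> omega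
      · simp only [go, if_neg hc, if_neg hO, ih r (g+1), List.splitOnP_cons, hS,
          beq_iff_eq, if_neg hc, List.modifyHead_cons, List.count_cons, List.length_cons]
        congr 2 <;> omega

-- the A-side fold over the tail sections (all indices ≥ 1)
theorem rowA_tail (fwd : Bool) (S : List (List Char)) (acc : List Char) (k : Int) (hk : 1 ≤ k) :
    (PySem.List.enumerate S k).foldl (stepA fwd) acc
    = acc ++ (S.map (fun sec => '#' :: body fwd sec)).flatten := by
  induction S generalizing acc k with
  | nil => simp [PySem.List.enumerate]
  | cons s0 S ih =>
    rw [PySem.List.enumerate_cons, List.foldl_cons, ih _ (k + 1) (by omega)]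
    simp only [stepA, gt_iff_lt, if_pos (by omega : (0:Int) < k)]
    by_cases h0 : s0.length = 0
    · have : s0 = [] := List.eq_nil_of_length_eq_zero h0
      subst this
      simp [body, pk_zero_zero]
    · simp only [if_neg h0, countO, body, pk]
      cases fwd <;> simp

-- the per-row transforms agree
theorem rowA_eq_rollB (fwd : Bool) (row : List Char) : rowA fwd row = rollB fwd row := by
  -- B side: fold with counters = go
  have hB : ∀ (t : List Char) (out : List (List Char)) (r g : Nat),
      (let st := t.foldl (fun (st : List (List Char) × Nat × Nat) c =>
        if c = '#' then
          (st.1 ++ [if fwd then List.replicate st.2.1 'O' ++ List.replicate st.2.2 '.'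
                    else List.replicate st.2.2 '.' ++ List.replicate st.2.1 'O'] ++ [['#']], 0, 0)
        else if c = 'O' then (st.1, st.2.1 + 1, st.2.2)
        else (st.1, st.2.1, st.2.2 + 1)) (out, r, g)
      (st.1 ++ [if fwd then List.replicate st.2.1 'O' ++ List.replicate st.2.2 '.'
                else List.replicate st.2.2 '.' ++ List.replicate st.2.1 'O']).flatten)
      = out.flatten ++ go fwd t r g := by
    intro t
    induction t with
    | nil => intro out r g; simp [go, pk]
    | cons c t ih =>
      intro out r g
      by_cases hc : c = '#'
      · subst hc
        simp only [List.foldl_cons, if_pos rfl, ih, go]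
        simp [pk]
      · by_cases hO : c = 'O'
        · subst hO
          simp only [List.foldl_cons, if_neg hc, if_pos rfl, ih]
          simp [go, hc]
        · simp only [List.foldl_cons, if_neg hc, if_neg hO, ih]
          simp [go, hc, hO]
  -- A side: fold over enumerated sections = go
  have hA : rowA fwd row = go fwd row 0 0 := by
    rw [go_spec]
    rcases hS : List.splitOnP (· == '#') row with _ | ⟨s0, S⟩
    · exact absurd hS (List.splitOnP_ne_nil _ row)
    · simp only [rowA, splitOn_eq, hS, PySem.List.enumerate_cons, List.foldl_cons]
      rw [rowA_tail fwd S _ (0 + 1) (by omega)]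
      simp only [stepA, gt_iff_lt, lt_irrefl, if_neg (by omega : ¬ (0:Int) > 0)]
      by_cases h0 : s0.length = 0
      · have : s0 = [] := List.eq_nil_of_length_eq_zero h0
        subst this
        simp [pk_zero_zero]
      · simp only [if_neg h0, countO, pk]
        cases fwd <;> simp
  have := hB row [] 0 0
  simp only [List.flatten_nil, List.nil_append] at this
  rw [hA, rollB, ← this]

theorem flipA_eq_flipB (p : List (List Char)) : flipA p = flipB p := by
  unfold flipA flipB
  rw [PySem.List.foldl_append_singleton_eq_map]
  simp

-- ===== VERDICT (by name: the statement is the Claim_ definition above) =====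
theorem slideRocks_spec : Claim_equal_slideRocks := by
  intro platform direction _ _
  unfold Spec_slideRocks slideRocks slideRocks_alt
  simp only [flipA_eq_flipB, PySem.List.foldl_append_singleton_eq_map, List.nil_append]
  have hmap : ∀ (l : List (List Char)), l.map (rowA (direction == "north" || direction == "west"))
      = l.map (rollB (direction == "north" || direction == "west")) :=
    fun l => List.map_congr_left (fun row _ => rowA_eq_rollB _ row)
  by_cases hv : (direction == "north" || direction == "south") = true <;>
    simp [hv, hmap]
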